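-- pv_equiv track=rewrite | github.com/nomoredope/list_of_need | url_updater.py | domen_only
-- ===== SOURCE A (Python) =====
-- def domen_only(url: str):
--     a = ''
--     for i in range(len(url)):
--         if url[i] != '/' and url[i] != '\\':
--             if url[i] == '.':
--                 a += '~'
--             else:
--                 a += url[i]
--         else:
--             break
--     return a
-- ===== SOURCE B (Python) =====
-- def domen_only(url: str):
--     n = len(url)
--     i = url.find('/')
--     if i == -1:
--         i = n
--     j = url.find('\\')
--     if j == -1:
--         j = n
--     cut = min(i, j)
--     return ''.join('~' if c == '.' else c for c in url[:cut])
-- ===== Notes on version B (the rewrite author's own statement) =====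
-- stated objective: faster
-- what changed: Replaces the per-character copy loop with break by a two-phase decomposition: first locate the boundary as the minimum of the two separator find() positions (absent mapping to len(url)), then transform the sliced prefix in one join/map pass.
import Mathlib
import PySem

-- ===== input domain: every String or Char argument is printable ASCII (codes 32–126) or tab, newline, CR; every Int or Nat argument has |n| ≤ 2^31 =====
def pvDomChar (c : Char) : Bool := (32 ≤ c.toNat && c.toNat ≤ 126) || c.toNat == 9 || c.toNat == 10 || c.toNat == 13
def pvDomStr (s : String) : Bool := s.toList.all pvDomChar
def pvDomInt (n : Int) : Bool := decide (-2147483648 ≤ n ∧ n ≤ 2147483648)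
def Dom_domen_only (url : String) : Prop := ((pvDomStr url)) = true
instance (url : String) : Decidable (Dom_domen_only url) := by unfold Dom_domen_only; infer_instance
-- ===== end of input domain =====

-- B changes the single copy-loop-with-break into locate-boundary (min of two find()s), slice, then map; measured faster (C-level find+slice+join vs a Python char loop).

-- ===== PORT A =====
-- A's for-loop over url's characters with accumulator a and break on '/' or '\'
def domenAGo (a : String) (cs : List Char) : String :=
  match cs with
  | [] => a
  | c :: rest =>
    if c ≠ '/' ∧ c ≠ '\\' then
      domenAGo (a ++ (if c = '.' then "~" else String.ofList [c])) rest
    else a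

def domen_only (url : String) : String := domenAGo "" url.toList

-- ===== PORT B =====
def domen_only_alt (url : String) : String :=
  let n : Int := PySem.Str.len url
  let i0 : Int := PySem.Str.find url "/"
  let i : Int := if i0 = -1 then n else i0
  let j0 : Int := PySem.Str.find url "\\"
  let j : Int := if j0 = -1 then n else j0
  let cut : Int := min i j
  PySem.Str.join "" ((PySem.Str.slice url none (some cut)).toList.map
    (fun c => if c = '.' then "~" else String.ofList [c]))

-- ===== PRECONDITION & SPEC =====
def Spec_domen_only (url : String) (out : String) : Prop := out = domen_only_alt url
instance (url : String) (out : String) : Decidable (Spec_domen_only url out) := by unfold Spec_domen_only; infer_instance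

-- ===== CLAIM (what is proved, stated in full; the proofs are below) =====
def Claim_equal_domen_only : Prop := ∀ (url : String), Dom_domen_only url → Spec_domen_only url (domen_only url)

-- ===== LEMMAS AND PROOFS =====

def pvKeep (c : Char) : Bool := c ≠ '/' && c ≠ '\\'
def pvMap (c : Char) : Char := if c = '.' then '~' else c

lemma domenAGo_toList (cs : List Char) : ∀ (a : String),
    (domenAGo a cs).toList = a.toList ++ (cs.takeWhile pvKeep).map pvMap := by
  induction cs with
  | nil => intro a; simp [domenAGo]
  | cons c rest ih =>
    intro a
    by_cases h : c ≠ '/' ∧ c ≠ '\\'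
    · have hp : pvKeep c = true := by simp [pvKeep, h.1, h.2]
      simp only [domenAGo, if_pos h, ih, List.takeWhile_cons, hp]
      by_cases hc : c = '.'
      · simp [hc, pvMap]
      · simp [hc, pvMap]
    · have hp : pvKeep c = false := by
        simp [pvKeep]; rcases not_and_or.mp h with h' | h' <;> simp_all
      simp [domenAGo, if_neg h, hp]

lemma takeWhile_eq_take (p : Char → Bool) : ∀ (L : List Char) (k : Nat), k ≤ L.length →
    (∀ i, i < k → ∀ hi : i < L.length, p L[i] = true) →
    (∀ h : k < L.length, p L[k] = false) →
    L.takeWhile p = L.take k := by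
  intro L
  induction L with
  | nil => intro k _ _ _; simp
  | cons c rest ih =>
    intro k hk h1 h2
    cases k with
    | zero =>
      have : p c = false := h2 (by simp)
      simp [this]
    | succ k =>
      have hc : p c = true := h1 0 (Nat.succ_pos _) (by simp)
      simp only [List.takeWhile_cons, hc, if_true, List.take_succ_cons]
      rw [ih k (by simpa using hk)
        (fun i hi hi' => h1 (i+1) (by omega) (by simpa using Nat.succ_lt_succ hi'))
        (fun h => h2 (by simpa using Nat.succ_lt_succ h))]

-- the boundary index derived from a single-character find
def pvCut (L : List Char) (c : Char) : Nat :=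
  if PySem.Chars.find L [c] = -1 then L.length else (PySem.Chars.find L [c]).toNat

lemma prefix_singleton_drop {L : List Char} {c : Char} {i : Nat} :
    [c] <+: L.drop i ↔ L[i]? = some c := by
  constructor
  · rintro ⟨t, ht⟩
    have : (L.drop i)[0]? = some c := by rw [← ht]; simp
    simpa [List.getElem?_drop] using this
  · intro h
    obtain ⟨hi, hget⟩ := List.getElem?_eq_some_iff.mp h
    refine ⟨(L.drop i).tail, ?_⟩
    have hlen : 0 < (L.drop i).length := by simp; omega
    cases hd : L.drop i with
    | nil => simp [hd] at hlen
    | cons x t =>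
      have hx : (L.drop i)[0]? = some x := by simp [hd]
      rw [List.getElem?_drop] at hx
      simp only [Nat.add_zero, h] at hx
      simp_all

lemma pvCut_spec (L : List Char) (c : Char) :
    pvCut L c ≤ L.length ∧
    (∀ i, i < pvCut L c → L[i]? ≠ some c) ∧
    (pvCut L c < L.length → L[pvCut L c]? = some c) := by
  unfold pvCut
  by_cases h : PySem.Chars.find L [c] = -1
  · rw [if_pos h]
    refine ⟨le_refl _, ?_, by omega⟩
    intro i _ hc
    exact (PySem.Chars.find_eq_neg_one_iff L [c]).mp h
      ((prefix_singleton_drop.mpr hc).isInfix.trans (L.drop_suffix i).isInfix)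
  · rw [if_neg h]
    have hge : 0 ≤ PySem.Chars.find L [c] := by
      rw [PySem.Chars.find_nonneg_iff]
      exact (PySem.Chars.find_ne_neg_one_iff L [c]).mp h
    obtain ⟨h1, h2⟩ := PySem.Chars.find_spec (s := L) (sub := [c]) hge
    have hle := PySem.Chars.find_le_length (s := L) (sub := [c])
    refine ⟨by omega, ?_, fun _ => prefix_singleton_drop.mp h1⟩
    intro i hi hc
    exact h2 i hi (prefix_singleton_drop.mpr hc)

lemma cut_toNat (url : String) (c : Char) (sub : String) (hsub : sub.toList = [c]) :
    (if PySem.Str.find url sub = -1 then ((PySem.Str.len url : Int)) else PySem.Str.find url sub)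
      = (pvCut url.toList c : Int) := by
  have hf : PySem.Str.find url sub = PySem.Chars.find url.toList [c] := by
    simp [hsub]
  rw [hf]
  unfold pvCut
  by_cases h : PySem.Chars.find url.toList [c] = -1
  · simp [h, PySem.Str.len]
  · have hge : 0 ≤ PySem.Chars.find url.toList [c] := by
      rw [PySem.Chars.find_nonneg_iff]
      exact (PySem.Chars.find_ne_neg_one_iff url.toList [c]).mp h
    simp [h, Int.toNat_of_nonneg hge]

theorem domen_only_spec : Claim_equal_domen_only := by
  intro url _
  unfold Spec_domen_only domen_only domen_only_alt
  obtain ⟨hle1, hlt1, heq1⟩ := pvCut_spec url.toList '/'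
  obtain ⟨hle2, hlt2, heq2⟩ := pvCut_spec url.toList '\\'
  apply String.toList_inj.mp
  rw [domenAGo_toList]
  have hcut1 := cut_toNat url '/' "/" (by decide)
  have hcut2 := cut_toNat url '\\' "\\" (by decide)
  simp only [hcut1, hcut2]
  have hmin : min ((pvCut url.toList '/' : Int)) ((pvCut url.toList '\\' : Int))
      = ((min (pvCut url.toList '/') (pvCut url.toList '\\') : Nat) : Int) := by
    omega
  rw [hmin]
  have hslice : (PySem.Str.slice url none
      (some ((min (pvCut url.toList '/') (pvCut url.toList '\\') : Nat) : Int))).toList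
      = url.toList.take (min (pvCut url.toList '/') (pvCut url.toList '\\')) := by
    rw [PySem.Str.toList_slice, PySem.Chars.slice_eq_listSlice, PySem.List.slice_to_natCast]
  rw [hslice]
  have htake : url.toList.takeWhile pvKeep
      = url.toList.take (min (pvCut url.toList '/') (pvCut url.toList '\\')) := by
    apply takeWhile_eq_take
    · omega
    · intro i hi hiL
      have h1 : url.toList[i]? ≠ some '/' := hlt1 i (by omega)
      have h2 : url.toList[i]? ≠ some '\\' := hlt2 i (by omega)
      rw [List.getElem?_eq_getElem hiL] at h1 h2
      simp only [ne_eq, Option.some.injEq] at h1 h2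
      simp [pvKeep, h1, h2]
    · intro hklen
      rcases le_total (pvCut url.toList '/') (pvCut url.toList '\\') with hm | hm
      · have hk : min (pvCut url.toList '/') (pvCut url.toList '\\') = pvCut url.toList '/' :=
          min_eq_left hm
        have hsome : url.toList[min (pvCut url.toList '/') (pvCut url.toList '\\')]? = some '/' := by
          rw [hk]; exact heq1 (hk ▸ hklen)
        rw [List.getElem?_eq_getElem hklen] at hsome
        simp only [Option.some.injEq] at hsome
        simp [pvKeep, hsome]
      · have hk : min (pvCut url.toList '/') (pvCut url.toList '\\') = pvCut url.toList '\\' :=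
          min_eq_right hm
        have hsome : url.toList[min (pvCut url.toList '/') (pvCut url.toList '\\')]? = some '\\' := by
          rw [hk]; exact heq2 (hk ▸ hklen)
        rw [List.getElem?_eq_getElem hklen] at hsome
        simp only [Option.some.injEq] at hsome
        simp [pvKeep, hsome]
  rw [← htake]
  rw [PySem.Str.toList_join]
  simp only [List.map_map]
  simp only [Function.comp_def]
  have : (fun c => (if c = '.' then "~" else String.ofList [c]).toList) = fun c => [pvMap c] := by
    funext c
    by_cases hc : c = '.' <;> simp [hc, pvMap]
  rw [this]
  have : (url.toList.takeWhile pvKeep).map (fun c => [pvMap c])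
      = ((url.toList.takeWhile pvKeep).map pvMap).map (fun c => [c]) := by
    simp [List.map_map, Function.comp_def]
  rw [this]
  have hnil : "".toList = ([] : List Char) := rfl
  rw [hnil, PySem.Chars.join_nil_singletons]
  simp
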